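-- pv_equiv track=rewrite | github.com/SalahKhadir/ChatBot | chatbot/test.py | find_skills_by_category
-- ===== SOURCE A (Python) =====
-- def find_skills_by_category(text, skill_categories):
--     text = text.lower()
--     results = {}
--
--     for category, skills in skill_categories.items():
--         found = [skill for skill in skills if skill.lower() in text]
--         if found:
--             results[category] = found
--
--     return results
-- ===== SOURCE B (Python) =====
-- def find_skills_by_category(text, skill_categories):
--     t = text.lower()
--     # position-driven scan: for each distinct pattern length slide a window over
--     # the text once and look the window up in the set of lowered patterns,
--     # instead of a separate substring search per skill.
--     patterns = [s.lower() for skills in skill_categories.values() for s in skills]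
--     pats = set(patterns)
--     lengths = []
--     for p in patterns:
--         if len(p) not in lengths:
--             lengths.append(len(p))
--     hit = set()
--     for L in lengths:
--         for i in range(len(t) - L + 1):
--             w = t[i:i + L]
--             if w in pats:
--                 hit.add(w)
--     results = {}
--     for category, skills in skill_categories.items():
--         found = [s for s in skills if s.lower() in hit]
--         if found:
--             results[category] = found
--     return results
-- ===== Notes on version B (the rewrite author's own statement) =====
-- stated objective: faster
-- what changed: B replaces A's per-skill substring search with a position-driven scan: it flattens all skills to a set of lowered patterns, then for each distinct pattern length slides a window over the lowered text once, collecting windows that are patterns into a hit set, and assembles the per-category lists by set membership; the text is traversed once per distinct pattern length instead of once per skill.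
import Mathlib
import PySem

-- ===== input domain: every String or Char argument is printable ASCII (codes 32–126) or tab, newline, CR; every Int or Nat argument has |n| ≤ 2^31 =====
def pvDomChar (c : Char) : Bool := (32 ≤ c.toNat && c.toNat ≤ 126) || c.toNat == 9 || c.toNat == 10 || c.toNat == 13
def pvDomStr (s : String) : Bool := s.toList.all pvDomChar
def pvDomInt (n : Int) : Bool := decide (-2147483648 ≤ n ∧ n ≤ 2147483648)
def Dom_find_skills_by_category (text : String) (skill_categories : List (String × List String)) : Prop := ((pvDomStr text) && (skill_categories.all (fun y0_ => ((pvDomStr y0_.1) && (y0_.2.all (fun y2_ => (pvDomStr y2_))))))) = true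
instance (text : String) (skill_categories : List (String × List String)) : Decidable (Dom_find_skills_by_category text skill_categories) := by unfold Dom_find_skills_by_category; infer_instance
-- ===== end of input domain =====

-- B replaces A's per-skill substring search by a position-driven scan: one sliding
-- window over the text per distinct pattern length, looked up in the set of
-- lowered patterns (objective: alternative).

-- ===== PORT A =====
-- A: lowercase the text, then for each (category, skills) keep the skills whose
-- lowercase form is a substring of the text; collect the nonempty lists in a dict.
def find_skills_by_category (text : String) (skill_categories : List (String × List String)) : List (String × List String) :=
  let t := PySem.Str.lower text
  let results := skill_categories.foldl
    (fun (r : PySem.Dict String (List String)) p =>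
      let found := p.2.filter (fun s => PySem.Str.isIn (PySem.Str.lower s) t)
      if found.isEmpty then r else r.insert p.1 found)
    PySem.Dict.empty
  results.items

-- ===== PORT B =====
-- B: flatten all skills to their lowered patterns; for each distinct pattern
-- length L slide a window t[i:i+L] over the text, collecting windows that are
-- patterns in the set 'hit'; then filter each category by membership in 'hit'.
def find_skills_by_category_alt (text : String) (skill_categories : List (String × List String)) : List (String × List String) :=
  let t := PySem.Str.lower text
  let patterns := skill_categories.flatMap (fun c => c.2.map PySem.Str.lower)
  let pats : PySem.Set String := PySem.Set.ofList patterns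
  let lengths := patterns.foldl (fun (ls : PySem.Set Int) p => PySem.Set.add ls (PySem.Str.len p)) PySem.Set.empty
  let hit := lengths.foldl
    (fun (h : PySem.Set String) L =>
      (PySem.List.pyRange 0 (PySem.Str.len t - L + 1) 1).foldl
        (fun (h : PySem.Set String) i =>
          let w := PySem.Str.slice t (some i) (some (i + L))
          if PySem.Set.contains pats w then PySem.Set.add h w else h)
        h)
    PySem.Set.empty
  let results := skill_categories.foldl
    (fun (r : PySem.Dict String (List String)) c =>
      let found := c.2.filter (fun s => PySem.Set.contains hit (PySem.Str.lower s))
      if found.isEmpty then r else r.insert c.1 found)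
    PySem.Dict.empty
  results.items

-- ===== PRECONDITION & SPEC =====
def Spec_find_skills_by_category (text : String) (skill_categories : List (String × List String)) (out : List (String × List String)) : Prop := out = find_skills_by_category_alt text skill_categories
instance (text : String) (skill_categories : List (String × List String)) (out : List (String × List String)) : Decidable (Spec_find_skills_by_category text skill_categories out) := by unfold Spec_find_skills_by_category; infer_instance

-- ===== CLAIM =====
def Claim_equal_find_skills_by_category : Prop := ∀ (text : String) (skill_categories : List (String × List String)), Dom_find_skills_by_category text skill_categories → Spec_find_skills_by_category text skill_categories (find_skills_by_category text skill_categories)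

-- ===== LEMMAS AND PROOFS =====

-- membership after the inner sliding-window pass at one fixed length
theorem pvMem_inner (f : Int → String) (cond : String → Bool) (is : List Int)
    (h : PySem.Set String) (q : String) :
    (q ∈ is.foldl
        (fun (h : PySem.Set String) i => if cond (f i) then PySem.Set.add h (f i) else h) h) ↔
      q ∈ h ∨ ∃ i ∈ is, q = f i ∧ cond q = true := by
  induction is generalizing h with
  | nil => simp
  | cons i is ih =>
    simp only [List.foldl_cons, ih, List.mem_cons]
    by_cases hc : cond (f i) = true
    · rw [if_pos hc, PySem.Set.mem_add]
      constructor
      · rintro ((hq | rfl) | ⟨j, hj, rfl, hcq⟩)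
        · exact Or.inl hq
        · exact Or.inr ⟨i, Or.inl rfl, rfl, hc⟩
        · exact Or.inr ⟨j, Or.inr hj, rfl, hcq⟩
      · rintro (hq | ⟨j, (rfl | hj), rfl, hcq⟩)
        · exact Or.inl (Or.inl hq)
        · exact Or.inl (Or.inr rfl)
        · exact Or.inr ⟨j, hj, rfl, hcq⟩
    · rw [if_neg hc]
      constructor
      · rintro (hq | ⟨j, hj, rfl, hcq⟩)
        · exact Or.inl hq
        · exact Or.inr ⟨j, Or.inr hj, rfl, hcq⟩
      · rintro (hq | ⟨j, (rfl | hj), rfl, hcq⟩)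
        · exact Or.inl hq
        · exact absurd hcq hc
        · exact Or.inr ⟨j, hj, rfl, hcq⟩

-- membership after the outer pass over the distinct lengths
theorem pvMem_outer (f : Int → Int → String) (cond : String → Bool) (r : Int → List Int)
    (ls : List Int) (h : PySem.Set String) (q : String) :
    (q ∈ ls.foldl
        (fun (h : PySem.Set String) L =>
          (r L).foldl
            (fun (h : PySem.Set String) i =>
              if cond (f L i) then PySem.Set.add h (f L i) else h) h) h) ↔
      q ∈ h ∨ ∃ L ∈ ls, ∃ i ∈ r L, q = f L i ∧ cond q = true := by
  induction ls generalizing h with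
  | nil => simp
  | cons L ls ih =>
    simp only [List.foldl_cons, ih, pvMem_inner, List.mem_cons]
    constructor
    · rintro ((hq | ⟨i, hi, rfl, hc⟩) | ⟨M, hM, i, hi, rfl, hc⟩)
      · exact Or.inl hq
      · exact Or.inr ⟨L, Or.inl rfl, i, hi, rfl, hc⟩
      · exact Or.inr ⟨M, Or.inr hM, i, hi, rfl, hc⟩
    · rintro (hq | ⟨M, (rfl | hM), i, hi, rfl, hc⟩)
      · exact Or.inl (Or.inl hq)
      · exact Or.inl (Or.inr ⟨i, hi, rfl, hc⟩)
      · exact Or.inr ⟨M, hM, i, hi, rfl, hc⟩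

-- the window scan over all lengths of patterns finds q ∈ patterns iff q is a substring
theorem pvScan_iff_isIn (t q : String) (patterns : List String) (hq : q ∈ patterns) :
    (∃ L ∈ patterns.foldl (fun (ls : PySem.Set Int) p => PySem.Set.add ls (PySem.Str.len p)) PySem.Set.empty,
      ∃ i ∈ PySem.List.pyRange 0 ((PySem.Str.len t : Int) - (L : Int) + 1) 1,
        q = PySem.Str.slice t (some i) (some (i + L))) ↔
      PySem.Str.isIn q t = true := by
  rw [show PySem.Str.isIn q t = PySem.Chars.isIn q.toList t.toList from by simp]
  rw [← PySem.Chars.exists_prefix_drop_iff_isIn]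
  constructor
  · rintro ⟨L, hL, i, hi, hsl⟩
    rw [PySem.List.mem_pyRange_one] at hi
    obtain ⟨h0, _⟩ := hi
    have hL0 : 0 ≤ L := by
      rw [PySem.Set.mem_foldl_add] at hL
      rcases hL with hL | ⟨p, _, rfl⟩
      · simp [PySem.Set.empty] at hL
      · have : PySem.Str.len p = (p.toList.length : Int) := by simp
        omega
    refine ⟨i.toNat, ?_⟩
    have hql : q.toList = PySem.Chars.slice t.toList (some i) (some (i + L)) := by
      rw [hsl]; simp
    rw [PySem.Chars.slice_eq_listSlice,
        PySem.List.slice_toNat _ h0 (by omega)] at hql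
    rw [hql]
    exact List.take_prefix _ _
  · rintro ⟨j, hj⟩
    have hlen : PySem.Str.len q ∈ patterns.foldl
        (fun (ls : PySem.Set Int) p => PySem.Set.add ls (PySem.Str.len p)) PySem.Set.empty := by
      rw [PySem.Set.mem_foldl_add]
      exact Or.inr ⟨q, hq, rfl⟩
    set k := min j t.toList.length with hk
    have hjk : q.toList <+: t.toList.drop k := by
      rcases le_or_gt j t.toList.length with hle | hgt
      · rwa [hk, min_eq_left hle]
      · rw [hk, min_eq_right (le_of_lt hgt)]
        have h1 : t.toList.drop j = [] := List.drop_eq_nil_of_le (le_of_lt hgt)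
        have h2 : t.toList.drop t.toList.length = [] := List.drop_eq_nil_of_le le_rfl
        rw [h2]; rw [h1] at hj; exact hj
    have hbound : k + q.toList.length ≤ t.toList.length := by
      have := hjk.length_le
      rw [List.length_drop] at this
      omega
    have hlq : PySem.Str.len q = (q.toList.length : Int) := by simp
    have hlt : PySem.Str.len t = (t.toList.length : Int) := by simp
    refine ⟨PySem.Str.len q, hlen, (k : Int), ?_, ?_⟩
    · rw [PySem.List.mem_pyRange_one]
      constructor
      · exact_mod_cast Nat.zero_le _
      · rw [hlq, hlt]; omega
    · apply String.toList_inj.mp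
      rw [show (PySem.Str.slice t (some (k : Int)) (some ((k : Int) + PySem.Str.len q))).toList
            = PySem.Chars.slice t.toList (some (k : Int)) (some ((k : Int) + PySem.Str.len q)) from by simp,
          PySem.Chars.slice_eq_listSlice, hlq]
      rw [PySem.List.slice_natCast_add]
      exact List.prefix_iff_eq_take.mp hjk

-- ===== VERDICT =====
set_option maxHeartbeats 1000000 in
theorem find_skills_by_category_spec : Claim_equal_find_skills_by_category := by
  intro text sc _
  unfold Spec_find_skills_by_category
  simp only [find_skills_by_category, find_skills_by_category_alt]
  congr 1
  apply PySem.List.foldl_congr_mem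
  intro r c hc
  have hfil : ∀ s ∈ c.2,
      PySem.Str.isIn (PySem.Str.lower s) (PySem.Str.lower text) =
      PySem.Set.contains
        ((((sc.flatMap (fun c => c.2.map PySem.Str.lower)).foldl
            (fun (ls : PySem.Set Int) p => PySem.Set.add ls (PySem.Str.len p)) PySem.Set.empty)).foldl
          (fun (h : PySem.Set String) L =>
            (PySem.List.pyRange 0 (PySem.Str.len (PySem.Str.lower text) - L + 1) 1).foldl
              (fun (h : PySem.Set String) i =>
                if PySem.Set.contains (PySem.Set.ofList (sc.flatMap (fun c => c.2.map PySem.Str.lower)))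
                     (PySem.Str.slice (PySem.Str.lower text) (some i) (some (i + L)))
                then PySem.Set.add h (PySem.Str.slice (PySem.Str.lower text) (some i) (some (i + L)))
                else h) h)
          PySem.Set.empty)
        (PySem.Str.lower s) := by
    intro s hs
    have hpat : PySem.Str.lower s ∈ sc.flatMap (fun c => c.2.map PySem.Str.lower) := by
      rw [List.mem_flatMap]
      exact ⟨c, hc, List.mem_map_of_mem hs⟩
    have hiff := pvScan_iff_isIn (PySem.Str.lower text) (PySem.Str.lower s) _ hpat
    rcases hIn : PySem.Str.isIn (PySem.Str.lower s) (PySem.Str.lower text) with _ | _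
    · symm
      rw [Bool.eq_false_iff]
      intro hcon
      rw [PySem.Set.contains_iff,
          pvMem_outer (fun L i => PySem.Str.slice (PySem.Str.lower text) (some i) (some (i + L)))
            (fun w => PySem.Set.contains (PySem.Set.ofList (sc.flatMap (fun c => c.2.map PySem.Str.lower))) w)] at hcon
      rcases hcon with hq | ⟨L, hL, i, hi, hqe, _⟩
      · simp [PySem.Set.empty] at hq
      · have : PySem.Str.isIn (PySem.Str.lower s) (PySem.Str.lower text) = true :=
          hiff.mp ⟨L, hL, i, hi, hqe⟩
        rw [hIn] at this; cases this
    · symm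
      rw [PySem.Set.contains_iff,
          pvMem_outer (fun L i => PySem.Str.slice (PySem.Str.lower text) (some i) (some (i + L)))
            (fun w => PySem.Set.contains (PySem.Set.ofList (sc.flatMap (fun c => c.2.map PySem.Str.lower))) w)]
      obtain ⟨L, hL, i, hi, hqe⟩ := hiff.mpr hIn
      refine Or.inr ⟨L, hL, i, hi, hqe, ?_⟩
      rw [PySem.Set.contains_iff, PySem.Set.mem_ofList]
      exact hpat
  rw [List.filter_congr (fun s hs => (hfil s hs).symm)]
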